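-- pv_equiv track=rewrite | github.com/EvilLogitech/python-project-50 | gendiff/scripts/comparator.py | parse
-- ===== SOURCE A (Python) =====
-- def parse(dict1, dict2):
--     equal_keys = set(dict1.keys()) & set(dict2.keys())
--     f1_keys = {('  - ', x) for x in (set(dict1.keys()) - equal_keys)}
--     f2_keys = {('  + ', x) for x in (set(dict2.keys()) - equal_keys)}
--     equal_keys = {('    ', x) for x in equal_keys}
--     all_keys_list = sorted(f1_keys | f2_keys | equal_keys, key=lambda x: x[1])
--     res = ['{']
--     for prefix, key in all_keys_list:
--         match prefix:
--             case '  - ':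
--                 res.append(f'{prefix}{key}: {dict1[key]}')
--             case '  + ':
--                 res.append(f'{prefix}{key}: {dict2[key]}')
--             case '    ':
--                 if dict1[key] == dict2[key]:
--                     res.append(f'{prefix}{key}: {dict1[key]}')
--                 else:
--                     res.append(f'  - {key}: {dict1[key]}')
--                     res.append(f'  + {key}: {dict2[key]}')
--     res.append('}')
--     return '\n'.join(res).replace('True', 'true').replace('False', 'false')
-- ===== SOURCE B (Python) =====
-- def parse(dict1, dict2):
--     items1 = sorted(dict1.items(), key=lambda kv: kv[0])
--     items2 = sorted(dict2.items(), key=lambda kv: kv[0])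
--     lines = []
--     i = j = 0
--     while i < len(items1) and j < len(items2):
--         k1, v1 = items1[i]
--         k2, v2 = items2[j]
--         if k1 < k2:
--             lines.append(f'  - {k1}: {v1}')
--             i += 1
--         elif k2 < k1:
--             lines.append(f'  + {k2}: {v2}')
--             j += 1
--         elif v1 == v2:
--             lines.append(f'    {k1}: {v1}')
--             i += 1
--             j += 1
--         else:
--             lines.append(f'  - {k1}: {v1}')
--             lines.append(f'  + {k2}: {v2}')
--             i += 1
--             j += 1
--     while i < len(items1):
--         k1, v1 = items1[i]
--         lines.append(f'  - {k1}: {v1}')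
--         i += 1
--     while j < len(items2):
--         k2, v2 = items2[j]
--         lines.append(f'  + {k2}: {v2}')
--         j += 1
--     return '\n'.join(['{'] + lines + ['}']).replace('True', 'true').replace('False', 'false')
-- ===== Notes on version B (the rewrite author's own statement) =====
-- stated objective: alternative
-- what changed: B replaces A's tagged-tuple sets and sort of the key union by a two-pointer merge of the two separately sorted item lists, emitting diff lines during the merge with no set operations or membership tests.
import Mathlib
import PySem

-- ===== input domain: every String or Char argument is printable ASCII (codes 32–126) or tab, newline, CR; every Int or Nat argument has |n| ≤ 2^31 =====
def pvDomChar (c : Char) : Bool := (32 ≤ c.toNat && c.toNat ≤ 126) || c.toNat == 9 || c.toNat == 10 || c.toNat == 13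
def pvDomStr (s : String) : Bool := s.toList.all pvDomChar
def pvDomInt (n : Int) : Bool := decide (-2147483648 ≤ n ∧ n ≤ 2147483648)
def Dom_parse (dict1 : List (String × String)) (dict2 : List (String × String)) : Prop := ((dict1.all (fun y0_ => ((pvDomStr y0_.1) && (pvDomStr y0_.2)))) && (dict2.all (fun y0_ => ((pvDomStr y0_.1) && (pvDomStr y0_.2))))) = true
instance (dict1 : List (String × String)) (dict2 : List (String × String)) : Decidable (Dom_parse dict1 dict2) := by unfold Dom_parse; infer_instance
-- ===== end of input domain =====

-- B replaces A's tagged-tuple sets and sort of the key union by a two-pointer merge of the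
-- two separately sorted item lists (objective: alternative). Return-value equivalence only.

-- ===== PORT A =====
def parse (dict1 : List (String × String)) (dict2 : List (String × String)) : String :=
  let d1 := PySem.Dict.ofList dict1
  let d2 := PySem.Dict.ofList dict2
  let equalKeys := PySem.Set.inter (PySem.Set.ofList (PySem.Dict.keys d1)) (PySem.Set.ofList (PySem.Dict.keys d2))
  let f1Keys := PySem.Set.ofList ((PySem.Set.diff (PySem.Set.ofList (PySem.Dict.keys d1)) equalKeys).map (fun x => (("  - " : String), x)))
  let f2Keys := PySem.Set.ofList ((PySem.Set.diff (PySem.Set.ofList (PySem.Dict.keys d2)) equalKeys).map (fun x => (("  + " : String), x)))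
  let equalTagged := PySem.Set.ofList (equalKeys.map (fun x => (("    " : String), x)))
  let allKeysList := PySem.List.sorted (PySem.Set.union (PySem.Set.union f1Keys f2Keys) equalTagged) (fun x => x.2) false
  let res := allKeysList.foldl (fun res px =>
    if px.1 = "  - " then
      res ++ [px.1 ++ px.2 ++ ": " ++ PySem.Dict.getD d1 px.2 ""]
    else if px.1 = "  + " then
      res ++ [px.1 ++ px.2 ++ ": " ++ PySem.Dict.getD d2 px.2 ""]
    else if px.1 = "    " then
      (if PySem.Dict.getD d1 px.2 "" = PySem.Dict.getD d2 px.2 "" then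
        res ++ [px.1 ++ px.2 ++ ": " ++ PySem.Dict.getD d1 px.2 ""]
      else
        res ++ ["  - " ++ px.2 ++ ": " ++ PySem.Dict.getD d1 px.2 "",
                "  + " ++ px.2 ++ ": " ++ PySem.Dict.getD d2 px.2 ""])
    else res) ["{"]
  PySem.Str.replace (PySem.Str.replace (PySem.Str.join "\n" (res ++ ["}"])) "True" "true") "False" "false"

-- ===== PORT B =====
-- B's main loop: two pointers into the two sorted item lists; the recursion consumes the
-- suffixes the pointers denote, the two trailing while-loops are the base cases.
def mergeDiff : List (String × String) → List (String × String) → List String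
  | [], ys => ys.map (fun p => "  + " ++ p.1 ++ ": " ++ p.2)
  | x :: xs, [] => (x :: xs).map (fun p => "  - " ++ p.1 ++ ": " ++ p.2)
  | x :: xs, y :: ys =>
    if x.1 < y.1 then ("  - " ++ x.1 ++ ": " ++ x.2) :: mergeDiff xs (y :: ys)
    else if y.1 < x.1 then ("  + " ++ y.1 ++ ": " ++ y.2) :: mergeDiff (x :: xs) ys
    else if x.2 = y.2 then ("    " ++ x.1 ++ ": " ++ x.2) :: mergeDiff xs ys
    else ("  - " ++ x.1 ++ ": " ++ x.2) :: ("  + " ++ y.1 ++ ": " ++ y.2) :: mergeDiff xs ys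
termination_by xs ys => xs.length + ys.length

def parse_alt (dict1 : List (String × String)) (dict2 : List (String × String)) : String :=
  let items1 := PySem.List.sorted (PySem.Dict.items (PySem.Dict.ofList dict1)) (fun kv => kv.1) false
  let items2 := PySem.List.sorted (PySem.Dict.items (PySem.Dict.ofList dict2)) (fun kv => kv.1) false
  let lines := mergeDiff items1 items2
  PySem.Str.replace (PySem.Str.replace (PySem.Str.join "\n" (["{"] ++ lines ++ ["}"])) "True" "true") "False" "false"

-- ===== PRECONDITION & SPEC =====
def Spec_parse (dict1 : List (String × String)) (dict2 : List (String × String)) (out : String) : Prop := out = parse_alt dict1 dict2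
instance (dict1 : List (String × String)) (dict2 : List (String × String)) (out : String) : Decidable (Spec_parse dict1 dict2 out) := by unfold Spec_parse; infer_instance

-- ===== CLAIM (what is proved, stated in full; the proofs are below) =====
def Claim_equal_parse : Prop := ∀ (dict1 : List (String × String)) (dict2 : List (String × String)), Dom_parse dict1 dict2 → Spec_parse dict1 dict2 (parse dict1 dict2)

-- ===== LEMMAS AND PROOFS =====

-- the prefix A's tagged sets attach to a key, read off from plain membership
def pvTag (K1 K2 : List String) (k : String) : String :=
  if k ∈ K1 then (if k ∈ K2 then "    " else "  - ") else "  + "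

-- the line(s) emitted for one key, read off from the two dicts
def lineA (d1 d2 : PySem.Dict String String) (k : String) : List String :=
  if PySem.Dict.contains d1 k then
    (if PySem.Dict.contains d2 k then
      (if PySem.Dict.getD d1 k "" = PySem.Dict.getD d2 k "" then
        ["    " ++ k ++ ": " ++ PySem.Dict.getD d1 k ""]
       else ["  - " ++ k ++ ": " ++ PySem.Dict.getD d1 k "",
             "  + " ++ k ++ ": " ++ PySem.Dict.getD d2 k ""])
     else ["  - " ++ k ++ ": " ++ PySem.Dict.getD d1 k ""])
  else ["  + " ++ k ++ ": " ++ PySem.Dict.getD d2 k ""]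

theorem pvTag_inj (K1 K2 : List String) : Function.Injective (fun k => (pvTag K1 K2 k, k)) := by
  intro a b h
  exact congrArg Prod.snd h

-- A's sorted tagged list is the sorted key union, tagged
theorem sorted_tagged_eq (K1 K2 : List String) :
    PySem.List.sorted
      (PySem.Set.union
        (PySem.Set.union
          (PySem.Set.ofList ((PySem.Set.diff (PySem.Set.ofList K1) (PySem.Set.inter (PySem.Set.ofList K1) (PySem.Set.ofList K2))).map (fun x => (("  - " : String), x))))
          (PySem.Set.ofList ((PySem.Set.diff (PySem.Set.ofList K2) (PySem.Set.inter (PySem.Set.ofList K1) (PySem.Set.ofList K2))).map (fun x => (("  + " : String), x)))))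
        (PySem.Set.ofList ((PySem.Set.inter (PySem.Set.ofList K1) (PySem.Set.ofList K2)).map (fun x => (("    " : String), x)))))
      (fun x => x.2) false
    = (PySem.List.sorted (PySem.Set.union (PySem.Set.ofList K1) (PySem.Set.ofList K2)) (fun x => x) false).map
        (fun k => (pvTag K1 K2 k, k)) := by
  apply PySem.List.sorted_eq_of_perm_of_pairwise_lt
  · apply List.Perm.trans (List.Perm.map _ (PySem.List.sorted_perm _ _ _))
    rw [List.perm_ext_iff_of_nodup]
    · intro p
      simp only [List.mem_map, PySem.Set.mem_union, PySem.Set.mem_inter,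
        PySem.Set.mem_diff, PySem.Set.mem_ofList]
      constructor
      · rintro ⟨k, hk, rfl⟩
        by_cases hk1 : k ∈ K1 <;> by_cases hk2 : k ∈ K2 <;>
          simp [pvTag, hk1, hk2] at hk ⊢
      · rintro (⟨⟨k, hk, rfl⟩ | ⟨k, hk, rfl⟩⟩ | ⟨k, hk, rfl⟩)
        · have hn : k ∉ K2 := fun h => hk.2 ⟨hk.1, h⟩
          exact ⟨k, Or.inl hk.1, by simp [pvTag, hk.1, hn]⟩
        · have hn : k ∉ K1 := fun h => hk.2 ⟨h, hk.1⟩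
          exact ⟨k, Or.inr hk.1, by simp [pvTag, hn]⟩
        · exact ⟨k, Or.inl hk.1, by simp [pvTag, hk.1, hk.2]⟩
    · exact (PySem.Set.nodup_union _ _ (PySem.Set.nodup_ofList _)).map (pvTag_inj K1 K2)
    · exact PySem.Set.nodup_union _ _ (PySem.Set.nodup_union _ _ (PySem.Set.nodup_ofList _))
  · rw [List.pairwise_map]
    have hU : PySem.Set.union (PySem.Set.ofList K1) (PySem.Set.ofList K2)
        = PySem.Set.ofList (PySem.Set.union (PySem.Set.ofList K1) (PySem.Set.ofList K2)) :=
      (PySem.Set.ofList_eq_self_of_nodup _ (PySem.Set.nodup_union _ _ (PySem.Set.nodup_ofList _))).symm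
    rw [hU]
    exact PySem.List.sorted_ofList_pairwise_lt _

-- A's result as "{" , flatMap of lineA over the sorted key union , "}"
theorem parse_eq_flat (dict1 dict2 : List (String × String)) :
    parse dict1 dict2 =
      PySem.Str.replace (PySem.Str.replace (PySem.Str.join "\n"
        (["{"] ++ (PySem.List.sorted
            (PySem.Set.union (PySem.Set.ofList (PySem.Dict.keys (PySem.Dict.ofList dict1)))
              (PySem.Set.ofList (PySem.Dict.keys (PySem.Dict.ofList dict2)))) (fun x => x) false).flatMap
            (lineA (PySem.Dict.ofList dict1) (PySem.Dict.ofList dict2)) ++ ["}"])) "True" "true") "False" "false" := by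
  unfold parse
  dsimp only
  rw [sorted_tagged_eq]
  rw [List.foldl_map]
  congr 2
  congr 1
  rw [← PySem.List.foldl_append_eq_flatMap
      (g := lineA (PySem.Dict.ofList dict1) (PySem.Dict.ofList dict2))]
  congr 1
  apply PySem.List.foldl_congr_mem
  intro res k hk
  rw [PySem.List.mem_sorted, PySem.Set.mem_union, PySem.Set.mem_ofList, PySem.Set.mem_ofList] at hk
  have c1 : PySem.Dict.contains (PySem.Dict.ofList dict1) k = decide (k ∈ PySem.Dict.keys (PySem.Dict.ofList dict1)) :=
    PySem.Dict.contains_eq_decide_mem_keys _ _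
  have c2 : PySem.Dict.contains (PySem.Dict.ofList dict2) k = decide (k ∈ PySem.Dict.keys (PySem.Dict.ofList dict2)) :=
    PySem.Dict.contains_eq_decide_mem_keys _ _
  by_cases hk1 : k ∈ PySem.Dict.keys (PySem.Dict.ofList dict1) <;>
    by_cases hk2 : k ∈ PySem.Dict.keys (PySem.Dict.ofList dict2) <;>
      simp [pvTag, lineA, hk1, hk2, c1, c2, apply_ite (res ++ ·)] at hk ⊢

-- plain merge of two strictly increasing key lists
def kmerge : List String → List String → List String
  | [], ys => ys
  | x :: xs, [] => x :: xs
  | x :: xs, y :: ys =>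
    if x < y then x :: kmerge xs (y :: ys)
    else if y < x then y :: kmerge (x :: xs) ys
    else x :: kmerge xs ys
termination_by xs ys => xs.length + ys.length

theorem kmerge_nil_left (ys : List String) : kmerge [] ys = ys := by
  rw [kmerge.eq_def]

theorem kmerge_cons_nil (x : String) (xs : List String) : kmerge (x :: xs) [] = x :: xs := by
  rw [kmerge.eq_def]

theorem kmerge_cons_cons (x y : String) (xs ys : List String) :
    kmerge (x :: xs) (y :: ys) =
      if x < y then x :: kmerge xs (y :: ys)
      else if y < x then y :: kmerge (x :: xs) ys
      else x :: kmerge xs ys := by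
  rw [kmerge.eq_def]

theorem kmerge_nil_right (xs : List String) : kmerge xs [] = xs := by
  cases xs with
  | nil => exact kmerge_nil_left []
  | cons x xs => exact kmerge_cons_nil x xs

theorem mem_kmerge (xs ys : List String) (z : String) :
    z ∈ kmerge xs ys ↔ z ∈ xs ∨ z ∈ ys := by
  fun_induction kmerge xs ys with
  | case1 ys => simp
  | case2 x xs => simp
  | case3 x xs y ys h ih => simp [ih]; tauto
  | case4 x xs y ys h h' ih => simp [ih]; tauto
  | case5 x xs y ys h h' ih =>
    have hxy : x = y := le_antisymm (not_lt.1 h') (not_lt.1 h)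
    simp [ih, hxy]; tauto

theorem pairwise_kmerge (xs ys : List String)
    (hx : xs.Pairwise (· < ·)) (hy : ys.Pairwise (· < ·)) :
    (kmerge xs ys).Pairwise (· < ·) := by
  fun_induction kmerge xs ys with
  | case1 ys => exact hy
  | case2 x xs => exact hx
  | case3 x xs y ys h ih =>
    refine List.Pairwise.cons ?_ (ih hx.of_cons hy)
    intro z hz
    rcases (mem_kmerge _ _ _).1 hz with hz | hz
    · exact (List.pairwise_cons.1 hx).1 z hz
    · rcases List.mem_cons.1 hz with hz | hz
      · exact hz ▸ h
      · exact h.trans ((List.pairwise_cons.1 hy).1 z hz)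
  | case4 x xs y ys h h' ih =>
    refine List.Pairwise.cons ?_ (ih hx hy.of_cons)
    intro z hz
    rcases (mem_kmerge _ _ _).1 hz with hz | hz
    · rcases List.mem_cons.1 hz with hz | hz
      · exact hz ▸ h'
      · exact h'.trans ((List.pairwise_cons.1 hx).1 z hz)
    · exact (List.pairwise_cons.1 hy).1 z hz
  | case5 x xs y ys h h' ih =>
    have hxy : x = y := le_antisymm (not_lt.1 h') (not_lt.1 h)
    refine List.Pairwise.cons ?_ (ih hx.of_cons hy.of_cons)
    intro z hz
    rcases (mem_kmerge _ _ _).1 hz with hz | hz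
    · exact (List.pairwise_cons.1 hx).1 z hz
    · exact hxy ▸ (List.pairwise_cons.1 hy).1 z hz

-- keys present only in dict1: lineA emits the "  - " line with the stored value
theorem flatMap_minus (d1 d2 : PySem.Dict String String) (zs : List (String × String))
    (h1 : ∀ p ∈ zs, PySem.Dict.contains d1 p.1 = true ∧ PySem.Dict.getD d1 p.1 "" = p.2)
    (h2 : ∀ p ∈ zs, PySem.Dict.contains d2 p.1 = false) :
    (zs.map Prod.fst).flatMap (lineA d1 d2) = zs.map (fun p => "  - " ++ p.1 ++ ": " ++ p.2) := by
  induction zs with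
  | nil => simp
  | cons z zs ih =>
    have ha := h1 z (by simp)
    have hb := h2 z (by simp)
    simp only [List.map_cons, List.flatMap_cons]
    rw [show lineA d1 d2 z.1 = ["  - " ++ z.1 ++ ": " ++ z.2] from by
      simp [lineA, ha.1, ha.2, hb]]
    rw [ih (fun p hp => h1 p (by simp [hp])) (fun p hp => h2 p (by simp [hp]))]
    rfl

-- keys present only in dict2: lineA emits the "  + " line with the stored value
theorem flatMap_plus (d1 d2 : PySem.Dict String String) (zs : List (String × String))
    (h1 : ∀ p ∈ zs, PySem.Dict.contains d2 p.1 = true ∧ PySem.Dict.getD d2 p.1 "" = p.2)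
    (h2 : ∀ p ∈ zs, PySem.Dict.contains d1 p.1 = false) :
    (zs.map Prod.fst).flatMap (lineA d1 d2) = zs.map (fun p => "  + " ++ p.1 ++ ": " ++ p.2) := by
  induction zs with
  | nil => simp
  | cons z zs ih =>
    have ha := h1 z (by simp)
    have hb := h2 z (by simp)
    simp only [List.map_cons, List.flatMap_cons]
    rw [show lineA d1 d2 z.1 = ["  + " ++ z.1 ++ ": " ++ z.2] from by
      simp [lineA, ha.2, hb]]
    rw [ih (fun p hp => h1 p (by simp [hp])) (fun p hp => h2 p (by simp [hp]))]
    rfl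

-- B's merge, as lineA flat-mapped over the merged key lists
theorem mergeDiff_eq_flatMap (d1 d2 : PySem.Dict String String) :
    ∀ (xs ys : List (String × String)),
    (xs.map Prod.fst).Pairwise (· < ·) → (ys.map Prod.fst).Pairwise (· < ·) →
    (∀ p ∈ xs, PySem.Dict.contains d1 p.1 = true ∧ PySem.Dict.getD d1 p.1 "" = p.2) →
    (∀ p ∈ ys, PySem.Dict.contains d2 p.1 = true ∧ PySem.Dict.getD d2 p.1 "" = p.2) →
    (∀ k ∈ xs.map Prod.fst, k ∉ ys.map Prod.fst → PySem.Dict.contains d2 k = false) →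
    (∀ k ∈ ys.map Prod.fst, k ∉ xs.map Prod.fst → PySem.Dict.contains d1 k = false) →
    mergeDiff xs ys = (kmerge (xs.map Prod.fst) (ys.map Prod.fst)).flatMap (lineA d1 d2) := by
  intro xs ys
  fun_induction mergeDiff xs ys with
  | case1 ys =>
    intro _ _ _ hy _ hy2
    rw [List.map_nil, kmerge_nil_left]
    exact (flatMap_plus d1 d2 ys hy (fun p hp => hy2 p.1 (List.mem_map_of_mem hp) (by simp))).symm
  | case2 x xs =>
    intro _ _ hx _ hx2 _
    rw [List.map_nil, kmerge_nil_right]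
    exact (flatMap_minus d1 d2 (x :: xs) hx (fun p hp => hx2 p.1 (List.mem_map_of_mem hp) (by simp))).symm
  | case3 x xs y ys h ih =>
    intro sx sy hx hy hx2 hy2
    have hylow : ∀ k ∈ (y :: ys).map Prod.fst, x.1 < k := by
      intro k hk
      rcases List.mem_cons.1 hk with hk | hk
      · exact hk ▸ h
      · exact h.trans ((List.pairwise_cons.1 sy).1 k hk)
    have hnot : x.1 ∉ (y :: ys).map Prod.fst := fun hm => lt_irrefl _ (hylow _ hm)
    have ha := hx x (by simp)
    have hb : PySem.Dict.contains d2 x.1 = false := hx2 x.1 (by simp) hnot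
    simp only [List.map_cons]
    rw [kmerge_cons_cons, if_pos h, List.flatMap_cons]
    rw [show lineA d1 d2 x.1 = ["  - " ++ x.1 ++ ": " ++ x.2] from by
      simp [lineA, ha.1, ha.2, hb]]
    rw [ih sx.of_cons sy (fun p hp => hx p (by simp [hp])) hy
      (fun k hk hnk => hx2 k (by simp [hk]) hnk)
      (fun k hk hnk => hy2 k hk (by
        intro hm
        rcases List.mem_cons.1 hm with hm | hm
        · exact absurd (hm ▸ hylow k hk) (lt_irrefl _)
        · exact hnk hm))]
    simp
  | case4 x xs y ys h h' ih =>
    intro sx sy hx hy hx2 hy2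
    have hxlow : ∀ k ∈ (x :: xs).map Prod.fst, y.1 < k := by
      intro k hk
      rcases List.mem_cons.1 hk with hk | hk
      · exact hk ▸ h'
      · exact h'.trans ((List.pairwise_cons.1 sx).1 k hk)
    have hnot : y.1 ∉ (x :: xs).map Prod.fst := fun hm => lt_irrefl _ (hxlow _ hm)
    have ha := hy y (by simp)
    have hb : PySem.Dict.contains d1 y.1 = false := hy2 y.1 (by simp) hnot
    simp only [List.map_cons]
    rw [kmerge_cons_cons, if_neg (by exact h), if_pos h', List.flatMap_cons]
    rw [show lineA d1 d2 y.1 = ["  + " ++ y.1 ++ ": " ++ y.2] from by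
      simp [lineA, ha.2, hb]]
    rw [ih sx sy.of_cons hx (fun p hp => hy p (by simp [hp]))
      (fun k hk hnk => hx2 k hk (by
        intro hm
        rcases List.mem_cons.1 hm with hm | hm
        · exact absurd (hm ▸ hxlow k hk) (lt_irrefl _)
        · exact hnk hm))
      (fun k hk hnk => hy2 k (by simp [hk]) hnk)]
    simp
  | case5 x xs y ys h h' hv ih =>
    intro sx sy hx hy hx2 hy2
    have hxy : x.1 = y.1 := le_antisymm (not_lt.1 h') (not_lt.1 h)
    have ha := hx x (by simp)
    have hb := hy y (by simp)
    have hc2 : PySem.Dict.contains d2 x.1 = true := hxy ▸ hb.1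
    have hg2 : PySem.Dict.getD d2 x.1 "" = y.2 := hxy ▸ hb.2
    simp only [List.map_cons]
    rw [kmerge_cons_cons, if_neg (by exact h), if_neg (by exact h'), List.flatMap_cons]
    rw [show lineA d1 d2 x.1 = ["    " ++ x.1 ++ ": " ++ x.2] from by
      simp [lineA, ha.1, ha.2, hc2, hg2, hv]]
    rw [ih sx.of_cons sy.of_cons
      (fun p hp => hx p (by simp [hp])) (fun p hp => hy p (by simp [hp]))
      (fun k hk hnk => hx2 k (by simp [hk]) (by
        intro hm
        rcases List.mem_cons.1 hm with hm | hm
        · exact absurd (hm ▸ hxy ▸ (List.pairwise_cons.1 sx).1 k hk) (lt_irrefl _)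
        · exact hnk hm))
      (fun k hk hnk => hy2 k (by simp [hk]) (by
        intro hm
        rcases List.mem_cons.1 hm with hm | hm
        · exact absurd (hm ▸ hxy ▸ (List.pairwise_cons.1 sy).1 k hk) (lt_irrefl _)
        · exact hnk hm))]
    simp
  | case6 x xs y ys h h' hv ih =>
    intro sx sy hx hy hx2 hy2
    have hxy : x.1 = y.1 := le_antisymm (not_lt.1 h') (not_lt.1 h)
    have ha := hx x (by simp)
    have hb := hy y (by simp)
    have hc2 : PySem.Dict.contains d2 x.1 = true := hxy ▸ hb.1
    have hg2 : PySem.Dict.getD d2 x.1 "" = y.2 := hxy ▸ hb.2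
    simp only [List.map_cons]
    rw [kmerge_cons_cons, if_neg (by exact h), if_neg (by exact h'), List.flatMap_cons]
    rw [show lineA d1 d2 x.1 =
        ["  - " ++ x.1 ++ ": " ++ x.2, "  + " ++ y.1 ++ ": " ++ y.2] from by
      rw [← hxy]
      simp [lineA, ha.1, ha.2, hc2, hg2, hv]]
    rw [ih sx.of_cons sy.of_cons
      (fun p hp => hx p (by simp [hp])) (fun p hp => hy p (by simp [hp]))
      (fun k hk hnk => hx2 k (by simp [hk]) (by
        intro hm
        rcases List.mem_cons.1 hm with hm | hm
        · exact absurd (hm ▸ hxy ▸ (List.pairwise_cons.1 sx).1 k hk) (lt_irrefl _)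
        · exact hnk hm))
      (fun k hk hnk => hy2 k (by simp [hk]) (by
        intro hm
        rcases List.mem_cons.1 hm with hm | hm
        · exact absurd (hm ▸ hxy ▸ (List.pairwise_cons.1 sy).1 k hk) (lt_irrefl _)
        · exact hnk hm))]
    simp

-- B's sorted item lists have strictly increasing keys, store the dicts' values,
-- and their merged key list IS A's sorted key union
theorem parse_eq_alt (dict1 dict2 : List (String × String)) :
    parse dict1 dict2 = parse_alt dict1 dict2 := by
  rw [parse_eq_flat]
  unfold parse_alt
  dsimp only
  have nd1 : (PySem.Dict.ofList dict1).keys.Nodup := PySem.Dict.nodup_keys_ofList dict1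
  have nd2 : (PySem.Dict.ofList dict2).keys.Nodup := PySem.Dict.nodup_keys_ofList dict2
  set d1 := PySem.Dict.ofList dict1 with hd1
  set d2 := PySem.Dict.ofList dict2 with hd2
  set I1 := PySem.List.sorted d1.items (fun kv => kv.1) false with hI1
  set I2 := PySem.List.sorted d2.items (fun kv => kv.1) false with hI2
  have pk1 : (I1.map Prod.fst).Perm d1.keys :=
    (PySem.List.sorted_perm _ _ _).map Prod.fst
  have pk2 : (I2.map Prod.fst).Perm d2.keys :=
    (PySem.List.sorted_perm _ _ _).map Prod.fst
  have s1 : (I1.map Prod.fst).Pairwise (· < ·) := by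
    rw [List.pairwise_map]
    have hle : I1.Pairwise (fun a b => a.1 ≤ b.1) := PySem.List.sorted_pairwise _ _
    have hne : I1.Pairwise (fun a b => a.1 ≠ b.1) :=
      List.pairwise_map.1 (pk1.nodup_iff.2 nd1)
    exact (hle.and hne).imp (fun hp => lt_of_le_of_ne hp.1 hp.2)
  have s2 : (I2.map Prod.fst).Pairwise (· < ·) := by
    rw [List.pairwise_map]
    have hle : I2.Pairwise (fun a b => a.1 ≤ b.1) := PySem.List.sorted_pairwise _ _
    have hne : I2.Pairwise (fun a b => a.1 ≠ b.1) :=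
      List.pairwise_map.1 (pk2.nodup_iff.2 nd2)
    exact (hle.and hne).imp (fun hp => lt_of_le_of_ne hp.1 hp.2)
  have hval1 : ∀ p ∈ I1, PySem.Dict.contains d1 p.1 = true ∧ PySem.Dict.getD d1 p.1 "" = p.2 := by
    intro p hp
    have hp' : p ∈ d1.items := (PySem.List.mem_sorted _ _ _ _).1 hp
    rw [PySem.Dict.items_eq_map_keys d1 nd1 ""] at hp'
    rcases List.mem_map.1 hp' with ⟨k, hk, rfl⟩
    exact ⟨by rw [PySem.Dict.contains_eq_decide_mem_keys]; simpa, rfl⟩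
  have hval2 : ∀ p ∈ I2, PySem.Dict.contains d2 p.1 = true ∧ PySem.Dict.getD d2 p.1 "" = p.2 := by
    intro p hp
    have hp' : p ∈ d2.items := (PySem.List.mem_sorted _ _ _ _).1 hp
    rw [PySem.Dict.items_eq_map_keys d2 nd2 ""] at hp'
    rcases List.mem_map.1 hp' with ⟨k, hk, rfl⟩
    exact ⟨by rw [PySem.Dict.contains_eq_decide_mem_keys]; simpa, rfl⟩
  have hnc2 : ∀ k ∈ I1.map Prod.fst, k ∉ I2.map Prod.fst → PySem.Dict.contains d2 k = false := by
    intro k _ hnk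
    rw [PySem.Dict.contains_eq_decide_mem_keys]
    simpa using fun hm => hnk (pk2.mem_iff.2 hm)
  have hnc1 : ∀ k ∈ I2.map Prod.fst, k ∉ I1.map Prod.fst → PySem.Dict.contains d1 k = false := by
    intro k _ hnk
    rw [PySem.Dict.contains_eq_decide_mem_keys]
    simpa using fun hm => hnk (pk1.mem_iff.2 hm)
  rw [mergeDiff_eq_flatMap d1 d2 I1 I2 s1 s2 hval1 hval2 hnc2 hnc1]
  have hU : PySem.List.sorted (PySem.Set.union (PySem.Set.ofList d1.keys) (PySem.Set.ofList d2.keys)) (fun x => x) false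
      = kmerge (I1.map Prod.fst) (I2.map Prod.fst) := by
    apply PySem.List.sorted_eq_of_perm_of_pairwise_lt
    · rw [List.perm_ext_iff_of_nodup]
      · intro z
        rw [mem_kmerge, PySem.Set.mem_union, PySem.Set.mem_ofList, PySem.Set.mem_ofList,
          pk1.mem_iff, pk2.mem_iff]
      · exact (pairwise_kmerge _ _ s1 s2).imp (fun hp => ne_of_lt hp)
      · exact PySem.Set.nodup_union _ _ (PySem.Set.nodup_ofList _)
    · exact pairwise_kmerge _ _ s1 s2
  rw [hU]

-- ===== VERDICT (by name: the statement is the Claim_ definition above) =====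
theorem parse_spec : Claim_equal_parse := by
  intro dict1 dict2 _
  unfold Spec_parse
  exact parse_eq_alt dict1 dict2
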